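-- pv_equiv track=rewrite | github.com/thealper2/codewars-solutions | 7-kyu/dominant_array_elements.py | solve
-- ===== SOURCE A (Python) =====
-- def solve(arr):
--     n = len(arr)
--     max_so_far = arr[-1]
--     result = [max_so_far]
--
--     for i in range(n - 2, -1, -1):
--         if arr[i] >= max_so_far and arr[i] not in result:
--             max_so_far = arr[i]
--             result.append(max_so_far)
--
--     return result[::-1]
-- ===== SOURCE B (Python) =====
-- def solve(arr):
--     # suffix-max table + forward selection, instead of A's fused backward scan
--     suffix = []                              # suffix maxima, built right-to-left
--     for x in reversed(arr):
--         suffix.append(x if not suffix else max(x, suffix[-1]))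
--     suffix.reverse()                         # suffix[i] == max(arr[i:])
--     out = []
--     n = len(arr)
--     for i in range(n):
--         if i == n - 1 or arr[i] > suffix[i + 1]:
--             out.append(arr[i])
--     return out
-- ===== Notes on version B (the rewrite author's own statement) =====
-- stated objective: faster
-- what changed: Replaces A's single backward scan that carries a running max and de-duplicates via a linear 'not in result' membership test (then reverses) with a two-pass O(n) algorithm: an explicit suffix-maximum table built once, then a forward pass emitting each element that strictly exceeds the suffix max to its right, producing the answer directly in original order with no membership test and no reversal.
import Mathlib
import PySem

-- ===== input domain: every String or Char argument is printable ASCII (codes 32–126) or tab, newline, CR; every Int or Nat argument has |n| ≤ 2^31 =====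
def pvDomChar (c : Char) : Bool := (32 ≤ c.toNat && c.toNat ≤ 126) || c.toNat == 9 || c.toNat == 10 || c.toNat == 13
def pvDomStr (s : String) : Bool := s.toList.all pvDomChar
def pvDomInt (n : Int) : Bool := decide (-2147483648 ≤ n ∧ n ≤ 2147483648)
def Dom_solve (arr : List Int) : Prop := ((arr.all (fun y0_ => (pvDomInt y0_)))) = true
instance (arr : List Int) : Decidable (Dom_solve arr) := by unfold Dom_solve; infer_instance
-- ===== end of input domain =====

-- B replaces A's fused backward scan (running max + 'not in result' membership test + final
-- reversal) with an explicit suffix-maximum table and a forward selection pass.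


-- ===== PORT A =====
-- loop body of A: if arr[i] >= max_so_far and arr[i] not in result: update both
def solveStep (st : Int × List Int) (x : Int) : Int × List Int :=
  if st.1 ≤ x ∧ st.2.contains x = false then (x, st.2 ++ [x]) else st

def solve (arr : List Int) : List Int :=
  let n : Int := arr.length
  match PySem.List.pyGet? arr (-1) with
  | none => []   -- last-element indexing raises IndexError on the empty list; excluded by Pre_solve
  | some max_so_far =>
    let st := (PySem.List.pyRange (n - 2) (-1) (-1)).foldl
      (fun st i => solveStep st (PySem.List.pyGetD arr i 0)) (max_so_far, [max_so_far])
    (PySem.List.slice? st.2 none none (-1)).getD []   -- result[::-1]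

-- ===== PORT B =====
-- backward pass: suffixMax arr lists max(arr[i:]) for each i (B's first loop over reversed(arr))
def suffixMax : List Int → List Int
  | [] => []
  | x :: rest =>
    match suffixMax rest with
    | [] => [x]
    | s :: t => max x s :: s :: t

-- forward pass: keep arr[i] when it is last or strictly exceeds suffix[i+1] (B's second loop)
def pick : List Int → List Int → List Int
  | x :: _, [_] => [x]
  | x :: xs, _ :: s :: ss => (if x > s then [x] else []) ++ pick xs (s :: ss)
  | _, _ => []

def solve_alt (arr : List Int) : List Int := pick arr (suffixMax arr)

-- ===== PRECONDITION & SPEC =====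
-- A unconditionally indexes the last element, so it raises IndexError exactly on the empty list.
def Pre_solve (arr : List Int) : Prop := arr ≠ []
instance (arr : List Int) : Decidable (Pre_solve arr) := by unfold Pre_solve; infer_instance
def pvWitness_solve : List Int := [3, 1, 2]

def Spec_solve (arr : List Int) (out : List Int) : Prop := out = solve_alt arr
instance (arr : List Int) (out : List Int) : Decidable (Spec_solve arr out) := by unfold Spec_solve; infer_instance

-- ===== CLAIM (what is proved, stated in full; the proofs are below) =====
def Claim_equal_solve : Prop := ∀ (arr : List Int), Dom_solve arr → Pre_solve arr → Spec_solve arr (solve arr)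

-- ===== LEMMAS AND PROOFS =====

-- max of a nonempty list (0 on [] is never used)
def maxL : List Int → Int
  | [] => 0
  | [x] => x
  | x :: y :: t => max x (maxL (y :: t))

-- reference recursion: dominant elements in original order
def domRec : List Int → List Int
  | [] => []
  | [x] => [x]
  | x :: y :: t => if maxL (y :: t) < x then x :: domRec (y :: t) else domRec (y :: t)

lemma maxL_cons (x : Int) {l : List Int} (h : l ≠ []) :
    maxL (x :: l) = max x (maxL l) := by
  cases l with
  | nil => exact absurd rfl h
  | cons y t => rfl

lemma domRec_cons (x : Int) {l : List Int} (h : l ≠ []) :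
    domRec (x :: l) = if maxL l < x then x :: domRec l else domRec l := by
  cases l with
  | nil => exact absurd rfl h
  | cons y t => rfl

lemma suffixMax_cons (x : Int) (xs : List Int) :
    suffixMax (x :: xs) = maxL (x :: xs) :: suffixMax xs := by
  induction xs generalizing x with
  | nil => rfl
  | cons y t ih =>
    show (match suffixMax (y :: t) with
          | [] => [x]
          | s :: t' => max x s :: s :: t') = _
    rw [ih y]
    rfl

lemma pick_suffixMax (l : List Int) : pick l (suffixMax l) = domRec l := by
  induction l with
  | nil => rfl
  | cons x xs ih =>
    cases xs with
    | nil => rfl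
    | cons y t =>
      rw [suffixMax_cons x (y :: t), suffixMax_cons y t]
      show (if x > maxL (y :: t) then [x] else []) ++ pick (y :: t) (maxL (y :: t) :: suffixMax t) = _
      rw [← suffixMax_cons y t, ih, domRec_cons x (by simp)]
      by_cases h : maxL (y :: t) < x <;> simp [h, gt_iff_lt]

-- invariant of A's backward loop, phrased over the reversed prefix
lemma loopA_invariant (ys : List Int) (z : Int) :
    (ys.reverse.foldl solveStep (z, [z])).1 = maxL (ys ++ [z]) ∧
    (ys.reverse.foldl solveStep (z, [z])).2.reverse = domRec (ys ++ [z]) ∧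
    (ys.reverse.foldl solveStep (z, [z])).1 ∈ (ys.reverse.foldl solveStep (z, [z])).2 ∧
    (∀ a ∈ (ys.reverse.foldl solveStep (z, [z])).2, a ≤ (ys.reverse.foldl solveStep (z, [z])).1) := by
  induction ys with
  | nil => simp [maxL, domRec]
  | cons w ws ih =>
    obtain ⟨h1, h2, h3, h4⟩ := ih
    have hfold : (w :: ws).reverse.foldl solveStep (z, [z])
        = solveStep (ws.reverse.foldl solveStep (z, [z])) w := by
      rw [List.reverse_cons, List.foldl_append]
      rfl
    set st := ws.reverse.foldl solveStep (z, [z]) with hst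
    have hne : ws ++ [z] ≠ [] := by simp
    rw [hfold]
    by_cases hlt : maxL (ws ++ [z]) < w
    · have hnotmem : st.2.contains w = false := by
        rw [List.contains_eq_mem]
        simpa using fun hmem => absurd (h4 w hmem) (by rw [h1]; omega)
      have hstep : solveStep st w = (w, st.2 ++ [w]) := by
        unfold solveStep
        rw [if_pos ⟨by rw [h1]; omega, hnotmem⟩]
      rw [hstep]
      refine ⟨?_, ?_, by simp, ?_⟩
      · rw [show (w :: ws) ++ [z] = w :: (ws ++ [z]) by simp, maxL_cons w hne]
        omega
      · rw [show (w :: ws) ++ [z] = w :: (ws ++ [z]) by simp, domRec_cons w hne,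
            if_pos hlt, List.reverse_append]
        simpa using h2
      · intro a ha
        rcases List.mem_append.mp ha with ha | ha
        · have := h4 a ha; simp; omega
        · simp at ha; simp [ha]
    · have hstep : solveStep st w = st := by
        unfold solveStep
        rcases lt_or_ge w st.1 with hc | hc
        · rw [if_neg]; intro ⟨hle, _⟩; omega
        · have hw : w = st.1 := by rw [h1] at hc ⊢; omega
          rw [if_neg]; intro ⟨_, hcon⟩
          rw [List.contains_eq_mem] at hcon
          simp [hw] at hcon
          exact hcon h3
      rw [hstep]
      refine ⟨?_, ?_, h3, h4⟩
      · rw [show (w :: ws) ++ [z] = w :: (ws ++ [z]) by simp, maxL_cons w hne, h1]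
        omega
      · rw [show (w :: ws) ++ [z] = w :: (ws ++ [z]) by simp, domRec_cons w hne, if_neg hlt, h2]

lemma map_range_getD (ys : List Int) (z : Int) :
    (List.range ys.length).map (fun k => (ys ++ [z]).getD k 0) = ys := by
  apply List.ext_getElem
  · simp
  · intro i h1 h2
    simp only [List.getElem_map, List.getElem_range]
    have hi : i < ys.length := by simpa using h2
    rw [List.getD_eq_getElem?_getD, List.getElem?_append_left hi,
      List.getElem?_eq_getElem hi]
    rfl

lemma solve_concat (ys : List Int) (z : Int) : solve (ys ++ [z]) = domRec (ys ++ [z]) := by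
  unfold solve
  rw [PySem.List.pyGet?_neg_one_append_singleton]
  simp only
  have hn : ((ys ++ [z]).length : Int) - 2 = (ys.length : Int) - 1 := by
    rw [List.length_append, List.length_singleton]; push_cast; omega
  have hrange : PySem.List.pyRange ((ys ++ [z]).length - 2) (-1) (-1)
      = (PySem.List.pyRange 0 (ys.length : Int) 1).reverse := by
    rw [hn, PySem.List.pyRange_neg_one_eq_reverse]
    norm_num
  rw [hrange]
  have hmap : (PySem.List.pyRange 0 (ys.length : Int) 1).map
      (fun i => PySem.List.pyGetD (ys ++ [z]) i 0) = ys := by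
    rw [PySem.List.pyRange_one]
    rw [List.map_map]
    simp only [Function.comp_def, Int.sub_zero, Int.toNat_natCast, zero_add,
      PySem.List.pyGetD_natCast]
    exact map_range_getD ys z
  have hfold : ((PySem.List.pyRange 0 (ys.length : Int) 1).reverse).foldl
      (fun st i => solveStep st (PySem.List.pyGetD (ys ++ [z]) i 0)) (z, [z])
      = ys.reverse.foldl solveStep (z, [z]) := by
    rw [← List.foldl_map, List.map_reverse, hmap]
  rw [hfold, PySem.List.slice?_none_none_neg_one]
  exact (loopA_invariant ys z).2.1

-- ===== VERDICT (by name: the statement is the Claim_ definition above) =====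
theorem solve_spec : Claim_equal_solve := by
  intro arr _ hpre
  unfold Spec_solve
  rcases List.eq_nil_or_concat arr with rfl | ⟨ys, z, rfl⟩
  · exact absurd rfl hpre
  · rw [List.concat_eq_append, solve_concat, solve_alt, pick_suffixMax]
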